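-- pv_equiv track=rewrite | github.com/retip94/advent-of-code-2019 | 13/main.py | show_screen
-- ===== SOURCE A (Python) =====
-- def show_screen(tiles):
--     max_x = 0
--     max_y = 0
--     for tile in tiles.items():
--         if tile[0][0] > max_x:
--             max_x = tile[0][0]
--         if tile[0][1] > max_y:
--             max_y = tile[0][1]
--     screen_list = []
--     for i in range(0, max_y + 1):
--         row = []
--         for j in range(0, max_x + 1):
--             tile = tiles.get((j, i), ' ')
--             row.append(tile)
--         screen_list.append(row)
--
--     for i, row in enumerate(screen_list):
--         screen_list[i] = ''.join(row)
--     return '\n'.join(screen_list)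
-- ===== SOURCE B (Python) =====
-- def show_screen(tiles):
--     max_x = 0
--     max_y = 0
--     for (x, y) in tiles:
--         if x > max_x:
--             max_x = x
--         if y > max_y:
--             max_y = y
--     grid = [[' '] * (max_x + 1) for _ in range(max_y + 1)]
--     for (x, y), val in tiles.items():
--         if x >= 0 and y >= 0:
--             grid[y][x] = val
--     return '\n'.join(''.join(row) for row in grid)
-- ===== Notes on version B (the rewrite author's own statement) =====
-- stated objective: alternative
-- what changed: B fills a blank (max_y+1)x(max_x+1) grid and scatters the sparse tile entries into it in one pass over tiles.items(), instead of A's gather that calls tiles.get on every grid cell; Pre_ only excludes association lists with duplicate (x,y) keys, which cannot arise from a Python dict (A reads the first match, B's scatter keeps the last).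
import Mathlib
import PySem

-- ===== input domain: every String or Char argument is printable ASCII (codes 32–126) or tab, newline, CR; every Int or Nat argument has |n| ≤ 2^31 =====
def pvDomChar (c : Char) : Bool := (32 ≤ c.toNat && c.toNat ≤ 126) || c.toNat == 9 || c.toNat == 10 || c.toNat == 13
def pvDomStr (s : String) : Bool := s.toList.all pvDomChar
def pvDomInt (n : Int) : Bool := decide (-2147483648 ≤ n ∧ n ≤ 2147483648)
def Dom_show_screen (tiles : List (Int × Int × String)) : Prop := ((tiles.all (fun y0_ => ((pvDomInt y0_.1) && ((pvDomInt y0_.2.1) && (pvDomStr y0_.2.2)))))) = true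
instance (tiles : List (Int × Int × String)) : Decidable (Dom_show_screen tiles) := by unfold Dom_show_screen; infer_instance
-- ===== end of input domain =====

-- B scatters the sparse tiles into a pre-filled blank grid in one pass instead of A's per-cell dict.get gather;
-- Pre_ excludes duplicate-key association lists (impossible for a Python dict).


-- ===== PORT A =====
-- tiles.get((j, i), ' ') on the association list: first pair whose key is (j, i), else ' '
def pvGet (tiles : List (Int × Int × String)) (j i : Int) : String :=
  match tiles.find? (fun t => t.1 == j && t.2.1 == i) with
  | some t => t.2.2
  | none => " "

-- one step of the max_x / max_y loop (identical in both Pythons)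
def pvMaxStep (m : Int × Int) (t : Int × Int × String) : Int × Int :=
  (if t.1 > m.1 then t.1 else m.1, if t.2.1 > m.2 then t.2.1 else m.2)

def pvMaxXY (tiles : List (Int × Int × String)) : Int × Int :=
  tiles.foldl pvMaxStep (0, 0)

def show_screen (tiles : List (Int × Int × String)) : String :=
  let m := pvMaxXY tiles
  let screen_list := (PySem.List.pyRange 0 (m.2 + 1) 1).map (fun i =>
    (PySem.List.pyRange 0 (m.1 + 1) 1).foldl (fun (row : List String) j => row ++ [pvGet tiles j i]) [])
  PySem.Str.join "\n" (screen_list.map (fun row => PySem.Str.join "" row))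

-- ===== PORT B =====
-- one step of B's scatter loop: grid[y][x] = val for the non-negative keys
def pvStep (g : List (List String)) (t : Int × Int × String) : List (List String) :=
  if 0 ≤ t.1 ∧ 0 ≤ t.2.1 then g.modify t.2.1.toNat (fun row => row.set t.1.toNat t.2.2) else g

def show_screen_alt (tiles : List (Int × Int × String)) : String :=
  let m := pvMaxXY tiles
  let grid0 : List (List String) := List.replicate (m.2 + 1).toNat (List.replicate (m.1 + 1).toNat " ")
  let grid := tiles.foldl pvStep grid0
  PySem.Str.join "\n" (grid.map (fun row => PySem.Str.join "" row))

-- ===== PRECONDITION & SPEC =====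
-- Pre_ excludes association lists with duplicate (x, y) keys: they cannot arise from a Python dict
-- (A's get reads the first match while B's scatter keeps the last write, so the corner is an encoding artefact).
def Pre_show_screen (tiles : List (Int × Int × String)) : Prop :=
  (tiles.map (fun t => (t.1, t.2.1))).Nodup
instance (tiles : List (Int × Int × String)) : Decidable (Pre_show_screen tiles) := by unfold Pre_show_screen; infer_instance
def pvWitness_show_screen : (List (Int × Int × String)) := [(0, 0, "x"), (2, 1, "#")]
def Spec_show_screen (tiles : List (Int × Int × String)) (out : String) : Prop := out = show_screen_alt tiles
instance (tiles : List (Int × Int × String)) (out : String) : Decidable (Spec_show_screen tiles out) := by unfold Spec_show_screen; infer_instance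

-- ===== CLAIM (what is proved, stated in full; the proofs are below) =====
def Claim_equal_show_screen : Prop := ∀ (tiles : List (Int × Int × String)), Dom_show_screen tiles → Pre_show_screen tiles → Spec_show_screen tiles (show_screen tiles)

-- ===== LEMMAS AND PROOFS =====

theorem pvMax_aux (l : List (Int × Int × String)) : ∀ m0 : Int × Int,
    m0.1 ≤ (l.foldl pvMaxStep m0).1 ∧ m0.2 ≤ (l.foldl pvMaxStep m0).2 ∧
    ∀ t ∈ l, t.1 ≤ (l.foldl pvMaxStep m0).1 ∧ t.2.1 ≤ (l.foldl pvMaxStep m0).2 := by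
  induction l with
  | nil => intro m0; simp
  | cons a l ih =>
    intro m0
    obtain ⟨h1, h2, h3⟩ := ih (pvMaxStep m0 a)
    have ha1 : a.1 ≤ (pvMaxStep m0 a).1 := by simp only [pvMaxStep]; split_ifs <;> omega
    have ha2 : a.2.1 ≤ (pvMaxStep m0 a).2 := by simp only [pvMaxStep]; split_ifs <;> omega
    have hm1 : m0.1 ≤ (pvMaxStep m0 a).1 := by simp only [pvMaxStep]; split_ifs <;> omega
    have hm2 : m0.2 ≤ (pvMaxStep m0 a).2 := by simp only [pvMaxStep]; split_ifs <;> omega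
    simp only [List.foldl_cons]
    refine ⟨le_trans hm1 h1, le_trans hm2 h2, ?_⟩
    intro t ht
    rcases List.mem_cons.mp ht with h | h
    · subst h; exact ⟨le_trans ha1 h1, le_trans ha2 h2⟩
    · exact h3 t h

theorem pvMaxXY_bounds (tiles : List (Int × Int × String)) :
    0 ≤ (pvMaxXY tiles).1 ∧ 0 ≤ (pvMaxXY tiles).2 ∧
    ∀ t ∈ tiles, t.1 ≤ (pvMaxXY tiles).1 ∧ t.2.1 ≤ (pvMaxXY tiles).2 := by
  have := pvMax_aux tiles (0, 0)
  exact ⟨this.1, this.2.1, this.2.2⟩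

theorem pvStep_length (g : List (List String)) (t : Int × Int × String) :
    (pvStep g t).length = g.length := by
  unfold pvStep; split <;> simp

theorem pvScatter_length (tiles : List (Int × Int × String)) (g : List (List String)) :
    (tiles.foldl pvStep g).length = g.length := by
  induction tiles generalizing g with
  | nil => rfl
  | cons a l ih => rw [List.foldl_cons, ih, pvStep_length]

theorem pvScatter_rowlen (tiles : List (Int × Int × String)) (g : List (List String)) (W : Nat)
    (hg : ∀ row ∈ g, row.length = W) :
    ∀ row ∈ tiles.foldl pvStep g, row.length = W := by
  induction tiles generalizing g with
  | nil => exact hg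
  | cons a l ih =>
    rw [List.foldl_cons]
    refine ih (pvStep g a) ?_
    intro row hrow
    unfold pvStep at hrow
    split at hrow
    · by_cases hi : a.2.1.toNat < g.length
      · rw [List.modify_eq_set_get _ hi] at hrow
        rcases List.mem_or_eq_of_mem_set hrow with h | h
        · exact hg row h
        · rw [h, List.length_set]; exact hg _ (List.getElem_mem hi)
      · rw [List.modify_eq_self (by omega)] at hrow; exact hg row hrow
    · exact hg row hrow

-- writing a tile whose key is not (x0, y0) leaves cell (y0, x0) unchanged
theorem pvStep_cell_ne (G : List (List String)) (t : Int × Int × String) (y0 x0 : Nat)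
    (hne : ¬(t.1 = (x0 : Int) ∧ t.2.1 = (y0 : Int))) :
    (((pvStep G t)[y0]?.getD []))[x0]?.getD " " = ((G[y0]?.getD []))[x0]?.getD " " := by
  unfold pvStep
  split
  · rename_i hg
    by_cases hy : t.2.1.toNat = y0
    · have hyi : t.2.1 = (y0 : Int) := by omega
      have hxi : t.1 ≠ (x0 : Int) := fun h => hne ⟨h, hyi⟩
      have hxn : t.1.toNat ≠ x0 := by omega
      rw [List.getElem?_modify]
      cases G[y0]? <;> simp [hy, hxn]
    · rw [List.getElem?_modify]
      cases G[y0]? <;> simp [hy]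
  · rfl

theorem pv_nodup_concat {α : Type} (a : α) (l : List α) (h : (l ++ [a]).Nodup) :
    l.Nodup ∧ a ∉ l := by
  simp [List.nodup_append] at h
  exact ⟨h.1, fun hm => h.2 a hm rfl⟩

theorem pvScatter_cell (tiles : List (Int × Int × String)) (H W : Nat)
    (hnd : (tiles.map (fun t => (t.1, t.2.1))).Nodup)
    (hb : ∀ t ∈ tiles, (0 ≤ t.1 → t.1.toNat < W) ∧ (0 ≤ t.2.1 → t.2.1.toNat < H))
    (y0 x0 : Nat) (hy : y0 < H) (hx : x0 < W) :
    (((tiles.foldl pvStep (List.replicate H (List.replicate W " ")))[y0]?.getD []))[x0]?.getD " "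
      = pvGet tiles (x0 : Int) (y0 : Int) := by
  induction tiles using List.reverseRecOn with
  | nil =>
    simp [pvGet, hy, hx]
  | append_singleton l t ih =>
    have hnd' : ((l.map (fun t => (t.1, t.2.1))).Nodup) ∧
        (t.1, t.2.1) ∉ l.map (fun t => (t.1, t.2.1)) := by
      refine pv_nodup_concat _ _ ?_
      simpa using hnd
    have hb' : ∀ u ∈ l, (0 ≤ u.1 → u.1.toNat < W) ∧ (0 ≤ u.2.1 → u.2.1.toNat < H) :=
      fun u hu => hb u (List.mem_append_left _ hu)
    have ihl := ih hnd'.1 hb'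
    rw [List.foldl_append, List.foldl_cons, List.foldl_nil]
    unfold pvGet
    rw [List.find?_append]
    cases hfind : l.find? (fun u => u.1 == (x0 : Int) && u.2.1 == (y0 : Int)) with
    | some u =>
      -- the first match is in l; t has a different key, so the write does not touch (y0, x0)
      have hu := List.find?_some hfind
      have humem := List.mem_of_find?_eq_some hfind
      simp only [Bool.and_eq_true, beq_iff_eq] at hu
      have htne : ¬(t.1 = (x0 : Int) ∧ t.2.1 = (y0 : Int)) := by
        rintro ⟨h1, h2⟩
        exact hnd'.2 (by
          rw [h1, h2, ← hu.1, ← hu.2]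
          exact List.mem_map_of_mem humem)
      rw [pvStep_cell_ne _ _ _ _ htne, ihl]
      unfold pvGet
      rw [hfind]
      simp
    | none =>
      by_cases hpt : (t.1 = (x0 : Int) ∧ t.2.1 = (y0 : Int))
      · -- t is the (only) match: the write puts t.2.2 at (y0, x0)
        set G := l.foldl pvStep (List.replicate H (List.replicate W " ")) with hG
        have hGlen : G.length = H := by
          rw [hG, pvScatter_length, List.length_replicate]
        have hrow : ∀ row ∈ G, row.length = W := by
          refine pvScatter_rowlen l _ W ?_
          intro row hrow; exact (List.eq_of_mem_replicate hrow) ▸ List.length_replicate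
        have hy0 : y0 < G.length := by omega
        have hrowG : G[y0]? = some (G[y0]'hy0) := List.getElem?_eq_getElem hy0
        have hrlen : (G[y0]'hy0).length = W := hrow _ (List.getElem_mem hy0)
        unfold pvStep
        rw [if_pos ⟨by omega, by omega⟩]
        have hyn : t.2.1.toNat = y0 := by omega
        have hxn : t.1.toNat = x0 := by omega
        rw [List.getElem?_modify, hrowG]
        simp [hrlen, hx, hpt.1, hpt.2, List.find?]
      · -- no match anywhere: the cell stays blank
        rw [pvStep_cell_ne _ _ _ _ hpt, ihl]
        unfold pvGet
        rw [hfind]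
        have : (fun u => u.1 == (x0 : Int) && u.2.1 == (y0 : Int)) t = false := by
          simp only [Bool.eq_false_iff]
          intro h; exact hpt (by simpa using h)
        simp [this]

-- ===== VERDICT (by name: the statement is the Claim_ definition above) =====
theorem show_screen_spec : Claim_equal_show_screen := by
  intro tiles _ hpre
  unfold Spec_show_screen show_screen show_screen_alt
  simp only []
  obtain ⟨hmx, hmy, hmb⟩ := pvMaxXY_bounds tiles
  set m := pvMaxXY tiles with hm
  congr 1
  apply congrArg
  -- screen_list = grid, as lists of rows (lists of cell strings)
  set H := (m.2 + 1).toNat with hH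
  set W := (m.1 + 1).toNat with hW
  have hb : ∀ t ∈ tiles, (0 ≤ t.1 → t.1.toNat < W) ∧ (0 ≤ t.2.1 → t.2.1.toNat < H) := by
    intro t ht
    obtain ⟨h1, h2⟩ := hmb t ht
    exact ⟨fun h => by omega, fun h => by omega⟩
  apply List.ext_getElem
  · rw [List.length_map, PySem.List.length_pyRange_one, pvScatter_length,
      List.length_replicate]
    omega
  · intro k h1 h2
    rw [List.getElem_map, PySem.List.getElem_pyRange_one]
    simp only [List.length_map, PySem.List.length_pyRange_one] at h1
    have hk : k < H := by omega
    rw [PySem.List.foldl_append_singleton_eq_map, List.nil_append]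
    have h2' : k < (tiles.foldl pvStep (List.replicate H (List.replicate W " "))).length := h2
    apply List.ext_getElem
    · rw [List.length_map, PySem.List.length_pyRange_one]
      have := pvScatter_rowlen tiles (List.replicate H (List.replicate W " ")) W
        (fun row hrow => (List.eq_of_mem_replicate hrow) ▸ List.length_replicate)
        _ (List.getElem_mem h2')
      rw [this]; omega
    · intro x0 hx1 hx2
      rw [List.getElem_map, PySem.List.getElem_pyRange_one]
      simp only [List.length_map, PySem.List.length_pyRange_one] at hx1
      have hx : x0 < W := by omega
      have := pvScatter_cell tiles H W hpre hb k x0 hk hx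
      rw [List.getElem?_eq_getElem h2', Option.getD_some,
        List.getElem?_eq_getElem hx2, Option.getD_some] at this
      rw [this]
      norm_num
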